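-- pv_equiv track=rewrite | github.com/MalayBhunia/Smart_Calculator | Calculator.py | next_even
-- ===== SOURCE A (Python) =====
-- def is_even(num):
--     try:
--         if type(num)!=int:
--             raise ValueError
--         return True if num%2==0 else False
--     except ValueError:
--         return "Input must be an integer."
--
-- def next_even(num):
--     try:
--         if type(num)!=int:
--             raise TypeError
--         num+=1
--         while not is_even(num):
--             num+=1
--         return num
--     except TypeError:
--         return "Input must be an integer."
-- ===== SOURCE B (Python) =====
-- def next_even(num):
--     if type(num) != int:
--         return "Input must be an integer."
--     return num + 2 - (num % 2)
-- ===== Notes on version B (the rewrite author's own statement) =====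
-- stated objective: simpler
-- what changed: Replaces the increment-until-even while loop with a single closed-form arithmetic expression based on the input's parity.
import Mathlib
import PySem

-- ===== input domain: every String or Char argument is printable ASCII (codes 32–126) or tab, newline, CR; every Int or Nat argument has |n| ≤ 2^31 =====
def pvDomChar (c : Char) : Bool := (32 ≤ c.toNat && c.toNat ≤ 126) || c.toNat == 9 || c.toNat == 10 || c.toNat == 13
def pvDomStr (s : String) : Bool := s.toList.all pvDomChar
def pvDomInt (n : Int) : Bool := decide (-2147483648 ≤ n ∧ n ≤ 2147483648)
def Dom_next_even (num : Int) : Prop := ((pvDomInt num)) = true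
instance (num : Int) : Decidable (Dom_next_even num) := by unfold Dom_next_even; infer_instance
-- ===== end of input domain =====

-- ===== PORT A =====
-- B replaces A's increment-until-even loop with a closed-form expression (objective: simpler).
-- Dom/signature restricts to Int, so the Python type-check branch never fires; both ports are the int path.
def is_even_port (num : Int) : Bool := PySem.Int.mod num 2 == 0

def nextEvenLoop (num : Int) : Int :=
  if is_even_port num then num else nextEvenLoop (num + 1)
termination_by (PySem.Int.mod num 2).toNat
decreasing_by
  simp only [is_even_port, beq_iff_eq] at *
  have h1 := PySem.Int.mod_nonneg num (b := 2) (by omega)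
  have h2 := PySem.Int.mod_lt num (b := 2) (by omega)
  have e1 : PySem.Int.mod num 2 = num % 2 := PySem.Int.mod_eq_emod_of_pos (by omega)
  have e2 : PySem.Int.mod (num + 1) 2 = (num + 1) % 2 := PySem.Int.mod_eq_emod_of_pos (by omega)
  omega

def next_even (num : Int) : Int := nextEvenLoop (num + 1)

-- ===== PORT B =====
def next_even_alt (num : Int) : Int := num + 2 - PySem.Int.mod num 2

-- ===== PRECONDITION & SPEC =====
def Spec_next_even (num : Int) (out : Int) : Prop := out = next_even_alt num
instance (num : Int) (out : Int) : Decidable (Spec_next_even num out) := by unfold Spec_next_even; infer_instance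

-- ===== CLAIM (what is proved, stated in full; the proofs are below) =====
def Claim_equal_next_even : Prop := ∀ (num : Int), Dom_next_even num → Spec_next_even num (next_even num)

-- ===== LEMMAS AND PROOFS =====

-- ===== VERDICT (by name: the statement is the Claim_ definition above) =====
theorem mod2_eq (n : Int) : PySem.Int.mod n 2 = n % 2 :=
  PySem.Int.mod_eq_emod_of_pos (by omega)

theorem nextEvenLoop_even (n : Int) (h : n % 2 = 0) : nextEvenLoop n = n := by
  have hb : is_even_port n = true := by simp [is_even_port, h]
  rw [nextEvenLoop, hb]; simp

theorem nextEvenLoop_odd (n : Int) (h : n % 2 = 1) : nextEvenLoop n = n + 1 := by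
  have hb : is_even_port n = false := by simp [is_even_port, h]
  rw [nextEvenLoop, hb]
  simp [nextEvenLoop_even (n + 1) (by omega)]

theorem next_even_spec : Claim_equal_next_even := by
  intro num _
  unfold Spec_next_even next_even next_even_alt
  rcases (by omega : num % 2 = 0 ∨ num % 2 = 1) with h | h
  · rw [nextEvenLoop_odd _ (by omega), mod2_eq, h]; ring
  · rw [nextEvenLoop_even _ (by omega), mod2_eq, h]; ring
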